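-- pv_equiv track=rewrite | github.com/bramratz/GeneFinder | geneFinder.py | oneFrameV2
-- ===== SOURCE A (Python) =====
-- def restOfORF(DNA: str) -> str:
--     """
--     Given a DNA sequence finds the first in frame stop codon and returns
--     the sequence from the start up to, but not including the stop codon.
--     This is an ORF. Assumes that the DNA sequence is 5'->3' and
--     that it begins aith a start codon, 'ATG'. If no stop codon found
--     returns the whole sequence.
--     """
--     ORF = '' # To hold ORF str
--
--     # Iterate with step set to 3 since 3 bases per codon
--     for i in range(0, len(DNA)-2, 3):
--         # if codon isn't a stop codon append the codon to ORF
--         if DNA[i:i+3] not in ['TAG', 'TAA', 'TGA']: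
--             ORF += DNA[i:i+3]
--         # Stop if a stop codon is found
--         elif DNA[i:i+3] in ['TAG', 'TAA', 'TGA']:
--             break
--
--     return ORF
--
-- def oneFrameV2(DNA: str) -> str:
--     """
--     Given a DNA sequence searches from position 0, 3 bases at a time for a
--     start codon, 'ATG'. Calls restOfORF to find the ORF associated with that
--     startcodon and stores the sequence in a list. Ignores nested start
--     codons. If nested start codons are present will only return the longest
--     one. Returns a list of all ORF found in the DNA sequence.
--     """
--     frames = [] # List for ORFs found
--     frameIdx = 0  # Counter for string index
--
--     while frameIdx < len(DNA) - 2: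
--
--         if DNA[frameIdx:frameIdx+3] == "ATG":
--             ORF = restOfORF(DNA[frameIdx:]) # Call restOfORF if start codon found
--             frames.append(ORF) # Appends the ORF to frames list
--             frameIdx += len(ORF) # Increases index by length of ORF
--         else:
--             frameIdx += 3 # Increases index by codon length otherwise
--     return frames
-- ===== SOURCE B (Python) =====
-- def oneFrameV2(DNA: str) -> str:
--     """Single state-machine pass over frame-0 codons: track whether we are
--     inside an ORF and where it started; flush on a stop codon or at the end."""
--     frames = []
--     in_orf = False
--     start = 0
--     for i in range(0, len(DNA) - 2, 3):
--         codon = DNA[i:i+3]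
--         if not in_orf:
--             if codon == "ATG":
--                 in_orf = True
--                 start = i
--         elif codon in ("TAG", "TAA", "TGA"):
--             frames.append(DNA[start:i])
--             in_orf = False
--     if in_orf:
--         frames.append(DNA[start:start + ((len(DNA) - start) // 3) * 3])
--     return frames
-- ===== Notes on version B (the rewrite author's own statement) =====
-- stated objective: simpler
-- what changed: Replaced A's while-loop that re-invokes the restOfORF helper (which slices the whole suffix and rescans it codon by codon, rebuilding the ORF by string concatenation) with a single flat state-machine pass over codon indices that tracks in_orf/start and flushes one slice on a stop codon or at the end.
import Mathlib
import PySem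

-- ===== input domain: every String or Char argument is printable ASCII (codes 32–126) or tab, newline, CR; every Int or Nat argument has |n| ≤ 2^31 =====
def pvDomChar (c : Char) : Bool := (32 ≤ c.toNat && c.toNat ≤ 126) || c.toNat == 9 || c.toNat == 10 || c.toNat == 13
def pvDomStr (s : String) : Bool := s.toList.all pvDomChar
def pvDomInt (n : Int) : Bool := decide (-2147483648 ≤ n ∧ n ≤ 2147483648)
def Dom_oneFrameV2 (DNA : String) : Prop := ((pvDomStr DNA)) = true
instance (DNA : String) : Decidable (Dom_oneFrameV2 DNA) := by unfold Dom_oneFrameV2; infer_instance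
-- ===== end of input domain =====

-- B replaces A's while-loop + restOfORF helper rescan with one flat state-machine pass over
-- codon indices (objective: simpler). Return-value equivalence; no argument is mutated.

-- ===== PORT A =====
def pvStopCodons : List (List Char) := [['T','A','G'], ['T','A','A'], ['T','G','A']]

-- 'for i in range(0, len(DNA)-2, 3)' of restOfORF; the break returns ORF
def restOfORFLoop (DNA : List Char) : List Int → List Char → List Char
  | [], ORF => ORF
  | i :: rest, ORF =>
    if PySem.List.slice DNA (some i) (some (i + 3)) ∉ pvStopCodons then
      restOfORFLoop DNA rest (ORF ++ PySem.List.slice DNA (some i) (some (i + 3)))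
    else ORF

def restOfORF (DNA : List Char) : List Char :=
  restOfORFLoop DNA (PySem.List.pyRange 0 ((DNA.length : Int) - 2) 3) []

-- the while-loop of A; fuel only makes the recursion total (frameIdx grows by ≥ 3 per
-- iteration, so fuel len+1 is never exhausted — proved by pvLoopA_eq below)
def oneFrameLoopA (DNA : List Char) : Nat → Int → List (List Char) → List (List Char)
  | 0, _, frames => frames
  | fuel + 1, frameIdx, frames =>
    if frameIdx < (DNA.length : Int) - 2 then
      if PySem.List.slice DNA (some frameIdx) (some (frameIdx + 3)) = ['A','T','G'] then
        let ORF := restOfORF (PySem.List.slice DNA (some frameIdx) none)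
        oneFrameLoopA DNA fuel (frameIdx + (ORF.length : Int)) (frames ++ [ORF])
      else
        oneFrameLoopA DNA fuel (frameIdx + 3) frames
    else frames

def oneFrameV2 (DNA : String) : List String :=
  (oneFrameLoopA DNA.toList (DNA.toList.length + 1) 0 []).map String.ofList

-- ===== PORT B =====
-- one step of Source B's for-loop: state = ((in_orf, start), frames)
def oneFrameStepB (DNA : List Char) (st : (Bool × Int) × List (List Char)) (i : Int) :
    (Bool × Int) × List (List Char) :=
  let codon := PySem.List.slice DNA (some i) (some (i + 3))
  match st with
  | ((inOrf, start), frames) =>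
    if !inOrf then
      if codon = ['A','T','G'] then ((true, i), frames) else ((false, start), frames)
    else if codon ∈ pvStopCodons then
      ((false, start), frames ++ [PySem.List.slice DNA (some start) (some i)])
    else ((true, start), frames)

-- Source B's tail flush after the loop
def oneFrameFlushB (DNA : List Char) (st : (Bool × Int) × List (List Char)) :
    List (List Char) :=
  if st.1.1 then
    st.2 ++ [PySem.List.slice DNA (some st.1.2)
      (some (st.1.2 + PySem.Int.floordiv ((DNA.length : Int) - st.1.2) 3 * 3))]
  else st.2

def oneFrameV2_alt (DNA : String) : List String :=
  let l := DNA.toList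
  let st := (PySem.List.pyRange 0 ((l.length : Int) - 2) 3).foldl (oneFrameStepB l) ((false, 0), [])
  (oneFrameFlushB l st).map String.ofList

-- ===== PRECONDITION & SPEC =====
def Spec_oneFrameV2 (DNA : String) (out : List String) : Prop := out = oneFrameV2_alt DNA
instance (DNA : String) (out : List String) : Decidable (Spec_oneFrameV2 DNA out) := by unfold Spec_oneFrameV2; infer_instance

-- ===== CLAIM (what is proved, stated in full; the proofs are below) =====
def Claim_equal_oneFrameV2 : Prop := ∀ (DNA : String), Dom_oneFrameV2 DNA → Spec_oneFrameV2 DNA (oneFrameV2 DNA)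

-- ===== LEMMAS AND PROOFS =====
-- Both ports are shown equal to pvRef, a recursion on codon chunks: pvCollect is the run of
-- codons up to (excluding) the first stop codon, pvRef the list of ORFs from frame 0.

def pvCollect (l : List Char) : List Char :=
  if h : 3 ≤ l.length then
    if l.take 3 ∈ pvStopCodons then [] else l.take 3 ++ pvCollect (l.drop 3)
  else []
termination_by l.length
decreasing_by simp; omega

lemma pvCollect_short {l : List Char} (h : l.length < 3) : pvCollect l = [] := by
  rw [pvCollect]; rw [dif_neg (by omega)]

lemma pvCollect_stop {l : List Char} (h : 3 ≤ l.length) (hs : l.take 3 ∈ pvStopCodons) :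
    pvCollect l = [] := by
  rw [pvCollect]; rw [dif_pos h, if_pos hs]

lemma pvCollect_go {l : List Char} (h : 3 ≤ l.length) (hs : l.take 3 ∉ pvStopCodons) :
    pvCollect l = l.take 3 ++ pvCollect (l.drop 3) := by
  rw [pvCollect]; rw [dif_pos h, if_neg hs]

lemma pvRange3_nil (a b : Int) (h : b ≤ a) : PySem.List.pyRange a b 3 = [] := by
  rw [PySem.List.pyRange_of_pos a b (by norm_num)]
  rw [if_neg (by omega)]; simp

lemma pvRange3_cons (a b : Int) (h : a < b) :
    PySem.List.pyRange a b 3 = a :: PySem.List.pyRange (a + 3) b 3 := by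
  rw [PySem.List.pyRange_of_pos a b (by norm_num),
      PySem.List.pyRange_of_pos (a+3) b (by norm_num)]
  have key : ((b - a + 3 - 1) / 3).toNat
      = (if a + 3 < b then ((b - (a + 3) + 3 - 1) / 3).toNat else 0) + 1 := by
    split_ifs with h2 <;> omega
  rw [if_pos h, key, List.range_succ_eq_map]
  simp only [List.map_cons, List.map_map]
  congr 1
  · ring
  · exact List.map_congr_left fun k _ => by simp only [Function.comp_apply]; push_cast; ring

lemma pvSlice_codon (l : List Char) (i : Nat) :
    PySem.List.slice l (some (i : Int)) (some ((i : Int) + 3)) = (l.drop i).take 3 := by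
  have : ((i : Int) + 3) = (((i + 3 : Nat)) : Int) := by push_cast; ring
  rw [this, PySem.List.slice_natCast]
  congr 1; omega

lemma pvRestLoop_eq (l : List Char) :
    ∀ (m i : Nat) (acc : List Char), l.length ≤ i + m →
      restOfORFLoop l (PySem.List.pyRange (i : Int) ((l.length : Int) - 2) 3) acc
        = acc ++ pvCollect (l.drop i) := by
  intro m
  induction m with
  | zero =>
    intro i acc hm
    rw [pvRange3_nil _ _ (by omega)]
    rw [restOfORFLoop, pvCollect_short (by simp; omega)]
    simp
  | succ m ih =>
    intro i acc hm
    by_cases hcond : i + 3 ≤ l.length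
    · rw [pvRange3_cons _ _ (by omega)]
      rw [restOfORFLoop]
      rw [pvSlice_codon]
      have hlen : 3 ≤ (l.drop i).length := by simp; omega
      by_cases hs : (l.drop i).take 3 ∈ pvStopCodons
      · rw [if_neg (by simp [hs])]
        rw [pvCollect_stop hlen hs]; simp
      · rw [if_pos (by simp [hs])]
        have : ((i : Int) + 3) = (((i + 3 : Nat)) : Int) := by push_cast; ring
        rw [this, ih (i+3) _ (by omega)]
        rw [pvCollect_go hlen hs]
        simp [List.drop_drop]
    · rw [pvRange3_nil _ _ (by omega)]
      rw [restOfORFLoop, pvCollect_short (by simp; omega)]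
      simp

lemma pvCollect_len3 {l : List Char} (h : 3 ≤ l.length) (hs : l.take 3 ∉ pvStopCodons) :
    3 ≤ (pvCollect l).length := by
  rw [pvCollect_go h hs]; simp; omega

def pvRef (l : List Char) : List (List Char) :=
  if h : 3 ≤ l.length then
    if ha : l.take 3 = ['A','T','G'] then
      pvCollect l :: pvRef (l.drop (pvCollect l).length)
    else pvRef (l.drop 3)
  else []
termination_by l.length
decreasing_by
  · have h3 : 3 ≤ (pvCollect l).length :=
      pvCollect_len3 h (by rw [ha]; decide)
    simp; omega
  · simp; omega

lemma pvRef_short {l : List Char} (h : l.length < 3) : pvRef l = [] := by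
  rw [pvRef]; rw [dif_neg (by omega)]

lemma pvRef_atg {l : List Char} (h : 3 ≤ l.length) (ha : l.take 3 = ['A','T','G']) :
    pvRef l = pvCollect l :: pvRef (l.drop (pvCollect l).length) := by
  rw [pvRef]; rw [dif_pos h, dif_pos ha]

lemma pvRef_skip {l : List Char} (h : 3 ≤ l.length) (ha : l.take 3 ≠ ['A','T','G']) :
    pvRef l = pvRef (l.drop 3) := by
  rw [pvRef]; rw [dif_pos h, dif_neg ha]

lemma pvRestOfORF_eq (l : List Char) : restOfORF l = pvCollect l := by
  have := pvRestLoop_eq l l.length 0 [] (by omega)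
  simpa [restOfORF] using this

lemma pvLoopA_eq (l : List Char) :
    ∀ (fuel i : Nat) (frames : List (List Char)), l.length ≤ fuel + i →
      oneFrameLoopA l fuel (i : Int) frames = frames ++ pvRef (l.drop i) := by
  intro fuel
  induction fuel with
  | zero =>
    intro i frames hm
    rw [oneFrameLoopA, pvRef_short (by simp; omega)]; simp
  | succ fuel ih =>
    intro i frames hm
    by_cases hcond : i + 3 ≤ l.length
    · rw [oneFrameLoopA, if_pos (by omega)]
      rw [pvSlice_codon]
      have hlen : 3 ≤ (l.drop i).length := by simp; omega
      by_cases ha : (l.drop i).take 3 = ['A','T','G']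
      · rw [if_pos ha]
        rw [PySem.List.slice_from_natCast, pvRestOfORF_eq]
        have h3 : 3 ≤ (pvCollect (l.drop i)).length :=
          pvCollect_len3 hlen (by rw [ha]; decide)
        show oneFrameLoopA l fuel ((i : Int) + ((pvCollect (l.drop i)).length : Int))
            (frames ++ [pvCollect (l.drop i)]) = frames ++ pvRef (l.drop i)
        have hcast : ((i : Int) + ((pvCollect (l.drop i)).length : Int))
            = (((i + (pvCollect (l.drop i)).length : Nat)) : Int) := by push_cast; ring
        rw [hcast, ih _ _ (by omega)]
        rw [pvRef_atg hlen ha]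
        simp [List.drop_drop]
      · rw [if_neg ha]
        have hcast : ((i : Int) + 3) = (((i + 3 : Nat)) : Int) := by push_cast; ring
        rw [hcast, ih _ _ (by omega)]
        rw [pvRef_skip hlen ha]
        simp [List.drop_drop]
    · rw [oneFrameLoopA, if_neg (by omega)]
      rw [pvRef_short (by simp; omega)]; simp

lemma pvCollect_dvd (l : List Char) : 3 ∣ (pvCollect l).length := by
  induction l using pvCollect.induct with
  | case1 l h hs => rw [pvCollect]; simp [h, hs]
  | case2 l h hs ih => rw [pvCollect]; simp [h, hs]; omega
  | case3 l h => rw [pvCollect]; rw [dif_neg h]; simp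

lemma pvStepB_false (l : List Char) (s0 : Int) (frames : List (List Char)) (i : Int) :
    oneFrameStepB l ((false, s0), frames) i
      = if PySem.List.slice l (some i) (some (i + 3)) = ['A','T','G']
          then ((true, i), frames) else ((false, s0), frames) := rfl

lemma pvStepB_true (l : List Char) (start : Int) (frames : List (List Char)) (i : Int) :
    oneFrameStepB l ((true, start), frames) i
      = if PySem.List.slice l (some i) (some (i + 3)) ∈ pvStopCodons
          then ((false, start), frames ++ [PySem.List.slice l (some start) (some i)])
          else ((true, start), frames) := rfl

def pvInv (l : List Char) (start i : Nat) : Prop :=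
  start ≤ i ∧ 3 ∣ (i - start) ∧ start + 3 ≤ l.length ∧
    pvCollect (l.drop start) = (l.drop start).take (i - start) ++ pvCollect (l.drop i)

lemma pvFlush_true (l : List Char) (start i : Nat) (frames : List (List Char))
    (hn : l.length < i + 3) (hInv : pvInv l start i) :
    oneFrameFlushB l ((true, (start : Int)), frames)
      = frames ++ pvCollect (l.drop start)
          :: pvRef (l.drop (start + (pvCollect (l.drop start)).length)) := by
  obtain ⟨hle, hdvd, hs3, hinv⟩ := hInv
  rw [pvCollect_short (l := l.drop i) (by simp; omega)] at hinv
  rw [List.append_nil] at hinv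
  have hL : (pvCollect (l.drop start)).length = min (i - start) (l.length - start) := by
    rw [hinv]; simp
  have hdL : 3 ∣ (pvCollect (l.drop start)).length := pvCollect_dvd _
  rw [oneFrameFlushB]
  simp only [if_pos]
  rw [PySem.Int.floordiv_eq_ediv_of_pos (by norm_num)]
  have hcast : (start : Int) + (((l.length : Int) - (start : Int)) / 3) * 3
      = (((start + (pvCollect (l.drop start)).length : Nat)) : Int) := by
    push_cast
    omega
  rw [hcast, PySem.List.slice_natCast]
  have htake : (l.drop start).take (start + (pvCollect (l.drop start)).length - start)
      = pvCollect (l.drop start) := by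
    rw [hinv]
    rw [List.take_eq_take_iff]
    simp
  rw [htake]
  rw [pvRef_short (by simp; omega)]

lemma pvFlush_false (l : List Char) (s0 : Int) (frames : List (List Char)) :
    oneFrameFlushB l ((false, s0), frames) = frames := rfl

lemma pvFoldB_main (l : List Char) :
    ∀ (m i : Nat), l.length ≤ i + m →
      (∀ (frames : List (List Char)) (s0 : Int),
        oneFrameFlushB l ((PySem.List.pyRange (i : Int) ((l.length : Int) - 2) 3).foldl
            (oneFrameStepB l) ((false, s0), frames))
          = frames ++ pvRef (l.drop i))
      ∧ (∀ (start : Nat) (frames : List (List Char)), pvInv l start i →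
        oneFrameFlushB l ((PySem.List.pyRange (i : Int) ((l.length : Int) - 2) 3).foldl
            (oneFrameStepB l) ((true, (start : Int)), frames))
          = frames ++ pvCollect (l.drop start)
              :: pvRef (l.drop (start + (pvCollect (l.drop start)).length))) := by
  intro m
  induction m with
  | zero =>
    intro i hm
    rw [pvRange3_nil _ _ (by omega)]
    constructor
    · intro frames s0
      rw [List.foldl_nil, pvFlush_false, pvRef_short (by simp; omega)]
      simp
    · intro start frames hInv
      rw [List.foldl_nil, pvFlush_true l start i frames (by omega) hInv]
  | succ m ih =>
    intro i hm
    by_cases hcond : i + 3 ≤ l.length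
    · have hlen : 3 ≤ (l.drop i).length := by simp; omega
      have hcast3 : ((i : Int) + 3) = (((i + 3 : Nat)) : Int) := by push_cast; ring
      have e1 : i + 3 - i = 3 := by omega
      rw [pvRange3_cons _ _ (by omega)]
      constructor
      · intro frames s0
        rw [List.foldl_cons, pvStepB_false, pvSlice_codon]
        by_cases ha : (l.drop i).take 3 = ['A','T','G']
        · rw [if_pos ha, hcast3]
          have hInv2 : pvInv l i (i + 3) := by
            refine ⟨by omega, by omega, hcond, ?_⟩
            rw [pvCollect_go hlen (by rw [ha]; decide)]
            rw [e1, List.drop_drop]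
          rw [(ih (i + 3) (by omega)).2 i frames hInv2]
          rw [pvRef_atg hlen ha, List.drop_drop]
        · rw [if_neg ha, hcast3]
          rw [(ih (i + 3) (by omega)).1 frames s0]
          rw [pvRef_skip hlen ha, List.drop_drop]
      · intro start frames hInv
        obtain ⟨hle, hdvd, hs3, hinv⟩ := hInv
        rw [List.foldl_cons, pvStepB_true, pvSlice_codon]
        by_cases hstop : (l.drop i).take 3 ∈ pvStopCodons
        · rw [if_pos hstop, hcast3]
          rw [(ih (i + 3) (by omega)).1]
          rw [pvCollect_stop hlen hstop, List.append_nil] at hinv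
          have hL : (pvCollect (l.drop start)).length = i - start := by
            rw [hinv]
            simp only [List.length_take, List.length_drop]
            omega
          have hne : List.take 3 (List.drop i l) ≠ ['A','T','G'] := by
            intro h; rw [h] at hstop; exact absurd hstop (by decide)
          have hiL : start + (pvCollect (l.drop start)).length = i := by omega
          rw [PySem.List.slice_natCast, hiL, hinv, pvRef_skip hlen hne, List.drop_drop]
          simp
        · rw [if_neg hstop, hcast3]
          have hInv2 : pvInv l start (i + 3) := by
            refine ⟨by omega, by omega, hs3, ?_⟩
            have hsplit : i + 3 - start = (i - start) + 3 := by omega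
            rw [hinv, pvCollect_go hlen hstop]
            rw [hsplit, List.take_add]
            have hdd : List.drop (i - start) (List.drop start l) = List.drop i l := by
              rw [List.drop_drop]; congr 1; omega
            rw [hdd, List.drop_drop, List.append_assoc]
          rw [(ih (i + 3) (by omega)).2 start frames hInv2]
    · rw [pvRange3_nil _ _ (by omega)]
      constructor
      · intro frames s0
        rw [List.foldl_nil, pvFlush_false, pvRef_short (by simp; omega)]
        simp
      · intro start frames hInv
        rw [List.foldl_nil, pvFlush_true l start i frames (by omega) hInv]

lemma pvA_eq (l : List Char) :
    oneFrameLoopA l (l.length + 1) 0 [] = pvRef l := by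
  have := pvLoopA_eq l (l.length + 1) 0 [] (by omega)
  simpa using this

lemma pvB_eq (l : List Char) :
    oneFrameFlushB l ((PySem.List.pyRange 0 ((l.length : Int) - 2) 3).foldl
        (oneFrameStepB l) ((false, 0), []))
      = pvRef l := by
  have := (pvFoldB_main l l.length 0 (by omega)).1 [] 0
  simpa using this

-- ===== VERDICT (by name: the statement is the Claim_ definition above) =====
theorem oneFrameV2_spec : Claim_equal_oneFrameV2 := by
  intro DNA _
  show (oneFrameLoopA DNA.toList (DNA.toList.length + 1) 0 []).map String.ofList
      = (oneFrameFlushB DNA.toList ((PySem.List.pyRange 0 ((DNA.toList.length : Int) - 2) 3).foldl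
          (oneFrameStepB DNA.toList) ((false, 0), []))).map String.ofList
  rw [pvA_eq, pvB_eq]
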